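-- pv_equiv track=rewrite | github.com/AldieNightStar/molo | molo/compiler.py | readSpecs
-- ===== SOURCE A (Python) =====
-- from typing import Dict, List, Tuple
--
-- def readSpecs(lines: List[str]) -> List[str]:
--     newLines: List[str] = []
--     specs: List[str] = []
--     specMode = True
--     for line in lines:
--         if specMode:
--             spec = detectSpecial(line)
--             if spec: specs.append(spec); continue
--             if detectChapter(line):
--                 specMode = False
--         newLines.append(line)
--     return specs, lines
--
-- def detectSpecial(line: str) -> str:
--     if line.startswith("$"):
--         return line[1:]
--     return None
--
-- def detectChapter(line: str) -> str:
--     if line.startswith(":"):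
--         return line[1:]
-- ===== SOURCE B (Python) =====
-- from typing import List
--
-- def readSpecs(lines: List[str]):
--     # boundary = first chapter line (':' plus a non-empty name)
--     idx = next((i for i, l in enumerate(lines)
--                 if l.startswith(':') and len(l) > 1), len(lines))
--     specs = [l[1:] for l in lines[:idx]
--              if l.startswith('$') and len(l) > 1]
--     return specs, lines
-- ===== Notes on version B (the rewrite author's own statement) =====
-- stated objective: simpler
-- what changed: Replaced A's interleaved state-machine loop (with its dead newLines accumulator and specMode flag) by a two-phase decomposition: locate the first chapter line, then collect the specs from that prefix in one comprehension.
import Mathlib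
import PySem

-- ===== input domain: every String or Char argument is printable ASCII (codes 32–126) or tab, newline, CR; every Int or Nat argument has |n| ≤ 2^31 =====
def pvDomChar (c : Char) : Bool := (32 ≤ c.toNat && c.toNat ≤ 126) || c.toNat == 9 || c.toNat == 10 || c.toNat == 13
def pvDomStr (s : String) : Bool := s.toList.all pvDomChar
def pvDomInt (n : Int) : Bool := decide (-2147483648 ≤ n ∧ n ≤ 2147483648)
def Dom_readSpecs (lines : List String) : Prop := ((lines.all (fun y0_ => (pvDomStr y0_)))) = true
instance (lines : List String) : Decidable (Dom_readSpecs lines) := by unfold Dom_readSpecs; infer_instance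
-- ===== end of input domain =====

-- B replaces A's interleaved state-machine loop (with its dead newLines/specMode bookkeeping)
-- by a two-phase find-the-chapter-boundary-then-filter decomposition; return value only
-- (neither program mutates its argument).

-- ===== PORT A =====
-- Python truthiness of an Optional[str]: None and "" are falsy.
def pvTruthyOptStr (o : Option String) : Bool :=
  match o with
  | none => false
  | some s => PySem.Str.len s != 0

def detectSpecial (line : String) : Option String :=
  if PySem.Str.startswith line "$" then some (PySem.Str.slice line (some 1) none) else none

def detectChapter (line : String) : Option String :=
  if PySem.Str.startswith line ":" then some (PySem.Str.slice line (some 1) none) else none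

def readSpecs (lines : List String) : List String × List String :=
  let st := lines.foldl
    (fun (st : List String × List String × Bool) line =>
      let newLines := st.1
      let specs := st.2.1
      let specMode := st.2.2
      if specMode then
        let spec := detectSpecial line
        if pvTruthyOptStr spec then (newLines, specs ++ [spec.getD ""], specMode)
        else if pvTruthyOptStr (detectChapter line) then (newLines ++ [line], specs, false)
        else (newLines ++ [line], specs, specMode)
      else (newLines ++ [line], specs, specMode))
    ([], [], true)
  (st.2.1, lines)

-- ===== PORT B =====
def isChapterLine (l : String) : Bool :=
  PySem.Str.startswith l ":" && decide (1 < PySem.Str.len l)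

-- index of the first chapter line (len(lines) if there is none)
def chapterIdx : List String → Nat
  | [] => 0
  | l :: ls => if isChapterLine l then 0 else chapterIdx ls + 1

def readSpecs_alt (lines : List String) : List String × List String :=
  ((PySem.List.slice lines none (some ((chapterIdx lines : Int)))).filterMap
      (fun l =>
        if PySem.Str.startswith l "$" && decide (1 < PySem.Str.len l)
        then some (PySem.Str.slice l (some 1) none) else none),
   lines)

-- ===== PRECONDITION & SPEC =====
def Spec_readSpecs (lines : List String) (out : List String × List String) : Prop := out = readSpecs_alt lines
instance (lines : List String) (out : List String × List String) : Decidable (Spec_readSpecs lines out) := by unfold Spec_readSpecs; infer_instance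

-- ===== CLAIM (what is proved, stated in full; the proofs are below) =====
def Claim_equal_readSpecs : Prop := ∀ (lines : List String), Dom_readSpecs lines → Spec_readSpecs lines (readSpecs lines)

-- ===== LEMMAS AND PROOFS =====

-- the specs B computes, as take+filterMap (slice on natural bounds is take)
def specF (l : String) : Option String :=
  if PySem.Str.startswith l "$" && decide (1 < PySem.Str.len l)
  then some (PySem.Str.slice l (some 1) none) else none

theorem alt_eq_take (lines : List String) :
    readSpecs_alt lines = ((lines.take (chapterIdx lines)).filterMap specF, lines) := by
  simp [readSpecs_alt, specF, PySem.List.slice_to_natCast]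

theorem len_slice_one (l : String) :
    PySem.Str.len (PySem.Str.slice l (some 1) none) = (l.toList.tail.length : Int) := by
  rw [PySem.Str.len_eq]
  simp only [PySem.Str.slice, PySem.Chars.slice_eq_listSlice, PySem.List.slice_from_one,
    String.toList_ofList]

theorem truthy_special (l : String) :
    pvTruthyOptStr (detectSpecial l)
      = (PySem.Str.startswith l "$" && decide (1 < PySem.Str.len l)) := by
  unfold detectSpecial pvTruthyOptStr
  by_cases h : PySem.Str.startswith l "$" = true
  · rw [if_pos h, h]
    show (PySem.Str.len (PySem.Str.slice l (some 1) none) != 0) = _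
    rw [len_slice_one, PySem.Str.len_eq]
    rcases l.toList with _ | ⟨c, cs⟩
    · simp
    · by_cases h0 : cs.length = 0 <;>
        simp [h0, Nat.pos_iff_ne_zero, Int.natCast_eq_zero]
  · rw [if_neg h]
    rw [Bool.not_eq_true] at h
    rw [h]
    rfl

theorem truthy_chapter (l : String) :
    pvTruthyOptStr (detectChapter l) = isChapterLine l := by
  unfold detectChapter pvTruthyOptStr isChapterLine
  by_cases h : PySem.Str.startswith l ":" = true
  · rw [if_pos h, h]
    show (PySem.Str.len (PySem.Str.slice l (some 1) none) != 0) = _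
    rw [len_slice_one, PySem.Str.len_eq]
    rcases l.toList with _ | ⟨c, cs⟩
    · simp
    · by_cases h0 : cs.length = 0 <;>
        simp [h0, Nat.pos_iff_ne_zero, Int.natCast_eq_zero]
  · rw [if_neg h]
    rw [Bool.not_eq_true] at h
    rw [h]
    rfl

theorem not_both (l : String) (h : PySem.Str.startswith l "$" = true) :
    PySem.Str.startswith l ":" = false := by
  by_contra hc
  rw [Bool.not_eq_false] at hc
  rw [PySem.Str.startswith_eq, PySem.Chars.startswith_iff] at h hc
  obtain ⟨t, ht⟩ := h
  obtain ⟨u, hu⟩ := hc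
  rw [← hu] at ht
  have h1 : "$".toList = ['$'] := rfl
  have h2 : ":".toList = [':'] := rfl
  rw [h1, h2] at ht
  simp at ht

-- A's loop step, named for the proofs
def stepA (st : List String × List String × Bool) (line : String) :
    List String × List String × Bool :=
  let newLines := st.1
  let specs := st.2.1
  let specMode := st.2.2
  if specMode then
    let spec := detectSpecial line
    if pvTruthyOptStr spec then (newLines, specs ++ [spec.getD ""], specMode)
    else if pvTruthyOptStr (detectChapter line) then (newLines ++ [line], specs, false)
    else (newLines ++ [line], specs, specMode)
  else (newLines ++ [line], specs, specMode)

theorem foldl_false (lines : List String) : ∀ nl sp,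
    (lines.foldl stepA (nl, sp, false)).2.1 = sp := by
  induction lines with
  | nil => intro nl sp; rfl
  | cons l ls ih => intro nl sp; simpa [stepA] using ih (nl ++ [l]) sp

theorem foldl_true (lines : List String) : ∀ nl sp,
    (lines.foldl stepA (nl, sp, true)).2.1
      = sp ++ (lines.take (chapterIdx lines)).filterMap specF := by
  induction lines with
  | nil => intro nl sp; simp [chapterIdx]
  | cons l ls ih =>
    intro nl sp
    by_cases hs : pvTruthyOptStr (detectSpecial l) = true
    · have h1 : PySem.Str.startswith l "$" = true := by
        by_contra h
        rw [Bool.not_eq_true] at h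
        rw [truthy_special, h] at hs; simp at hs
      have hf : specF l = some (PySem.Str.slice l (some 1) none) := by
        unfold specF; rw [← truthy_special, hs]; rfl
        
      have hnc : isChapterLine l = false := by
        unfold isChapterLine; rw [not_both l h1]; rfl
      have hgd : (detectSpecial l).getD "" = PySem.Str.slice l (some 1) none := by
        unfold detectSpecial; rw [if_pos h1]; rfl
      have hstep : stepA (nl, sp, true) l
          = (nl, sp ++ [PySem.Str.slice l (some 1) none], true) := by
        simp [stepA, hs, hgd]
      rw [List.foldl_cons, hstep, ih]
      simp [chapterIdx, hnc, hf]
    · rw [Bool.not_eq_true] at hs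
      have hf : specF l = none := by unfold specF; rw [← truthy_special, hs]; rfl
        
      by_cases hc : pvTruthyOptStr (detectChapter l) = true
      · have hcl : isChapterLine l = true := by rw [← truthy_chapter, hc]
        have hstep : stepA (nl, sp, true) l = (nl ++ [l], sp, false) := by
          simp [stepA, hs, hc]
        rw [List.foldl_cons, hstep, foldl_false ls (nl ++ [l]) sp]
        simp [chapterIdx, hcl]
      · rw [Bool.not_eq_true] at hc
        have hcl : isChapterLine l = false := by rw [← truthy_chapter, hc]
        have hstep : stepA (nl, sp, true) l = (nl ++ [l], sp, true) := by
          simp [stepA, hs, hc]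
        rw [List.foldl_cons, hstep, ih]
        simp [chapterIdx, hcl, hf]

-- ===== VERDICT (by name: the statement is the Claim_ definition above) =====
theorem readSpecs_spec : Claim_equal_readSpecs := by
  intro lines _
  unfold Spec_readSpecs
  rw [alt_eq_take]
  show ((lines.foldl stepA ([], [], true)).2.1, lines) = _
  rw [foldl_true lines [] []]
  simp
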